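-- pv_equiv track=rewrite | github.com/ARaZoAnna/algorithm | PGS/Level0/no80.py | solution
-- ===== SOURCE A (Python) =====
-- def solution(arr):
--     answer = 0
--
--     for num in arr  :
--         cnt = 0
--         if num >= 50 and num % 2 == 0 :
--             while num>= 50 :
--                 num = num // 2
--                 cnt += 1
--
--         elif num < 50 and num % 2 == 1:
--             while num < 50 :
--                 num = num * 2 +1
--                 cnt += 1
--
--         answer = max(answer,cnt)
--     return answer
-- ===== SOURCE B (Python) =====
-- def _steps(num):
--     if num >= 50 and num % 2 == 0:
--         # smallest k>=1 with num // 2**k < 50  is  (num // 50).bit_length()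
--         return (num // 50).bit_length()
--     if 0 <= num < 50 and num % 2 == 1:
--         # after k steps the value is 2**k*(num+1)-1; smallest k with that >= 50
--         # is the smallest k with 2**k > 50 // (num+1), i.e. its bit_length
--         return (50 // (num + 1)).bit_length()
--     return 0
--
--
-- def solution(arr):
--     return max(map(_steps, arr), default=0)
-- ===== Notes on version B (the rewrite author's own statement) =====
-- stated objective: simpler
-- what changed: Replaces each inner while loop (repeated halving / 2n+1 doubling until the 50 boundary) with a closed-form step count computed from one integer division and bit_length.
import Mathlib
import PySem

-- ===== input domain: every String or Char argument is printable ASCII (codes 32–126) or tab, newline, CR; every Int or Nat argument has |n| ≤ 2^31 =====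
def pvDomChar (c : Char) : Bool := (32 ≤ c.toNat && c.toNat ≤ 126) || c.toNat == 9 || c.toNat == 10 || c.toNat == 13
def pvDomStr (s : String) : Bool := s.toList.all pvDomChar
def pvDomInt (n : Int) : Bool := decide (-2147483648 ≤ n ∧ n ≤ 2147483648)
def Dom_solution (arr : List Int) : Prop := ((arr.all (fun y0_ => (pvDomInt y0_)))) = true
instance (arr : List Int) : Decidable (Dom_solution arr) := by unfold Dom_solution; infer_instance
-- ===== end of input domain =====

-- B replaces A's inner while loops by closed-form step counts from one // and bit_length.

-- ===== PORT A =====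
-- 'while num >= 50: num //= 2; cnt += 1' — the fuel only makes the loop total;
-- 64 steps always suffice inside Dom (|num| ≤ 2^31 halves below 50 within 27 steps).
def loopHalve : Nat → Int → Int → Int
  | 0, _, cnt => cnt
  | fuel + 1, num, cnt =>
    if 50 ≤ num then loopHalve fuel (PySem.Int.floordiv num 2) (cnt + 1) else cnt

-- 'while num < 50: num = num*2 + 1; cnt += 1' — the fuel only makes the loop total;
-- inside Pre_ it is entered only with odd 0 ≤ num < 50, where 6 ≤ 64 steps suffice.
def loopDouble : Nat → Int → Int → Int
  | 0, _, cnt => cnt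
  | fuel + 1, num, cnt =>
    if num < 50 then loopDouble fuel (num * 2 + 1) (cnt + 1) else cnt

def solution (arr : List Int) : Int :=
  arr.foldl (fun answer num =>
    max answer
      (if 50 ≤ num ∧ PySem.Int.mod num 2 = 0 then loopHalve 64 num 0
       else if num < 50 ∧ PySem.Int.mod num 2 = 1 then loopDouble 64 num 0
       else 0)) 0

-- ===== PORT B =====
-- int.bit_length (only applied to positive values here) → PySem.Int.bitLength
def stepsB (num : Int) : Int :=
  if 50 ≤ num ∧ PySem.Int.mod num 2 = 0 then
    (PySem.Int.bitLength (PySem.Int.floordiv num 50) : Int)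
  else if 0 ≤ num ∧ num < 50 ∧ PySem.Int.mod num 2 = 1 then
    (PySem.Int.bitLength (PySem.Int.floordiv 50 (num + 1)) : Int)
  else 0

def solution_alt (arr : List Int) : Int := (arr.map stepsB).foldl max 0

-- ===== PRECONDITION & SPEC =====
-- Pre_ excludes lists containing a negative odd number: there A's second while loop
-- never terminates (num*2+1 decreases), so A returns no value at all.
def Pre_solution (arr : List Int) : Prop :=
  ∀ num ∈ arr, num < 0 → PySem.Int.mod num 2 = 0
instance (arr : List Int) : Decidable (Pre_solution arr) := by unfold Pre_solution; infer_instance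
def pvWitness_solution : List Int := [100, 3, -4, 0]
def Spec_solution (arr : List Int) (out : Int) : Prop := out = solution_alt arr
instance (arr : List Int) (out : Int) : Decidable (Spec_solution arr out) := by unfold Spec_solution; infer_instance

-- ===== CLAIM (what is proved, stated in full; the proofs are below) =====
def Claim_equal_solution : Prop := ∀ (arr : List Int), Dom_solution arr → Pre_solution arr → Spec_solution arr (solution arr)

-- ===== LEMMAS AND PROOFS =====

lemma loopHalve_of_lt (fuel : Nat) (num cnt : Int) (h : num < 50) :
    loopHalve fuel num cnt = cnt := by
  cases fuel with
  | zero => rfl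
  | succ f => rw [loopHalve, if_neg (by omega)]

lemma floordiv_floordiv (a b c : Int) (hb : 0 < b) (hc : 0 < c) :
    PySem.Int.floordiv (PySem.Int.floordiv a b) c = PySem.Int.floordiv a (b * c) := by
  rw [PySem.Int.floordiv_eq_ediv_of_pos hb, PySem.Int.floordiv_eq_ediv_of_pos hc,
      PySem.Int.floordiv_eq_ediv_of_pos (by positivity),
      Int.ediv_ediv_of_nonneg (le_of_lt hb)]

lemma loopHalve_eq (fuel : Nat) : ∀ (num cnt : Int), 50 ≤ num → num < 50 * 2 ^ fuel →
    loopHalve fuel num cnt = cnt + (PySem.Int.bitLength (PySem.Int.floordiv num 50) : Int) := by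
  induction fuel with
  | zero => intro num cnt h1 h2; simp at h2; omega
  | succ f ih =>
    intro num cnt h1 h2
    rw [loopHalve, if_pos h1]
    by_cases h100 : num < 100
    · -- the loop stops after this step; num // 50 = 1
      rw [loopHalve_of_lt _ _ _ ((PySem.Int.floordiv_lt_iff_lt_mul (by omega)).2 (by omega))]
      have hq : PySem.Int.floordiv num 50 = 1 :=
        (PySem.Int.floordiv_eq_iff_of_pos (by omega)).2 (by omega)
      have h1' : PySem.Int.bitLength 1 = 1 := by decide
      rw [hq, h1']; omega
    · -- num ≥ 100: the induction hypothesis applies to num // 2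
      have hpow : (2:Int) ^ (f + 1) = 2 ^ f * 2 := pow_succ 2 f
      have hA : 50 ≤ PySem.Int.floordiv num 2 :=
        (PySem.Int.le_floordiv_iff_mul_le (by omega)).2 (by omega)
      have hB : PySem.Int.floordiv num 2 < 50 * 2 ^ f :=
        (PySem.Int.floordiv_lt_iff_lt_mul (by omega)).2 (by nlinarith)
      rw [ih _ _ hA hB]
      have hq2 : 2 ≤ PySem.Int.floordiv num 50 :=
        (PySem.Int.le_floordiv_iff_mul_le (by omega)).2 (by omega)
      rw [PySem.Int.bitLength_of_pos (by omega : 0 < PySem.Int.floordiv num 50)]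
      rw [floordiv_floordiv _ _ _ (by omega) (by omega),
          floordiv_floordiv _ _ _ (by omega) (by omega)]
      norm_num
      omega

lemma loopDouble_eq (fuel : Nat) : ∀ (num cnt : Int), 1 ≤ num → 50 < (num + 1) * 2 ^ fuel →
    loopDouble fuel num cnt = cnt + (PySem.Int.bitLength (PySem.Int.floordiv 50 (num + 1)) : Int) := by
  induction fuel with
  | zero =>
    intro num cnt h1 h2
    simp only [pow_zero, mul_one] at h2
    have hq : PySem.Int.floordiv 50 (num + 1) = 0 :=
      (PySem.Int.floordiv_eq_iff_of_pos (by omega)).2 (by constructor <;> omega)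
    rw [show loopDouble 0 num cnt = cnt from rfl, hq]
    simp [PySem.Int.bitLength_zero]
  | succ f ih =>
    intro num cnt h1 h2
    by_cases h50 : num < 50
    · rw [loopDouble, if_pos h50]
      have hdom2 : 50 < (num * 2 + 1 + 1) * 2 ^ f := by
        have hpow : ((num + 1) : Int) * 2 ^ (f + 1) = (num * 2 + 1 + 1) * 2 ^ f := by ring
        omega
      rw [ih (num * 2 + 1) (cnt + 1) (by omega) hdom2]
      have ht : 1 ≤ PySem.Int.floordiv 50 (num + 1) :=
        (PySem.Int.le_floordiv_iff_mul_le (by omega)).2 (by omega)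
      rw [PySem.Int.bitLength_of_pos (by omega : 0 < PySem.Int.floordiv 50 (num + 1))]
      rw [floordiv_floordiv _ _ _ (by omega) (by omega)]
      have harg : (num + 1) * 2 = num * 2 + 1 + 1 := by ring
      rw [harg]
      omega
    · rw [loopDouble, if_neg h50]
      have hq : PySem.Int.floordiv 50 (num + 1) = 0 :=
        (PySem.Int.floordiv_eq_iff_of_pos (by omega)).2 (by constructor <;> omega)
      rw [hq]
      simp [PySem.Int.bitLength_zero]

lemma step_eq (num : Int) (hdom : -2147483648 ≤ num ∧ num ≤ 2147483648)
    (hpre : num < 0 → PySem.Int.mod num 2 = 0) :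
    (if 50 ≤ num ∧ PySem.Int.mod num 2 = 0 then loopHalve 64 num 0
     else if num < 50 ∧ PySem.Int.mod num 2 = 1 then loopDouble 64 num 0
     else 0) = stepsB num := by
  unfold stepsB
  by_cases h1 : 50 ≤ num ∧ PySem.Int.mod num 2 = 0
  · rw [if_pos h1, if_pos h1]
    have hbig : num < 50 * 2 ^ 64 := by
      have : (50:Int) * 2 ^ 64 = 922337203685477580800 := by norm_num
      omega
    simpa using loopHalve_eq 64 num 0 h1.1 hbig
  · rw [if_neg h1, if_neg h1]
    by_cases h2 : num < 50 ∧ PySem.Int.mod num 2 = 1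
    · have hnn : 1 ≤ num := by
        by_contra hlt
        have e := h2.2
        have h0 : num < 0 ∨ num = 0 := by omega
        rcases h0 with hneg | hz
        · rw [hpre hneg] at e
          exact absurd e (by norm_num)
        · rw [hz] at e
          exact absurd e (by decide)
      rw [if_pos h2, if_pos ⟨by omega, h2⟩]
      have hbig : 50 < (num + 1) * 2 ^ 64 := by
        have h64 : (1:Int) * 2 ^ 64 ≤ (num + 1) * 2 ^ 64 := by
          apply mul_le_mul_of_nonneg_right (by omega) (by positivity)
        have : (1:Int) * 2 ^ 64 = 18446744073709551616 := by norm_num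
        omega
      simpa using loopDouble_eq 64 num 0 hnn hbig
    · rw [if_neg h2, if_neg (by tauto)]

-- ===== VERDICT (by name: the statement is the Claim_ definition above) =====
theorem solution_spec : Claim_equal_solution := by
  intro arr hdom hpre
  unfold Spec_solution solution solution_alt
  rw [List.foldl_map]
  refine PySem.List.foldl_congr_mem arr _ _ 0 ?_
  intro acc x hx
  simp only [Dom_solution, List.all_eq_true, pvDomInt, decide_eq_true_eq] at hdom
  rw [step_eq x (hdom x hx) (hpre x hx)]
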